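-- pv_equiv track=rewrite | github.com/PepeLira/Arbocensus_expert_system | src/tree_reviewer/models/helpers/mask_helpers.py | find_longest_continuous_segment2
-- ===== SOURCE A (Python) =====
-- def find_longest_continuous_segment2(data_array, y_start, start_padding=1, window_range=4, tolerance=100):
--     """
--     Find the longest continuous segment where the diameter is relatively constant.
--
--     :param data_array: List or array of width values.
--     :param tolerance: Tolerance for changes in diameter (default is 5 pixels).
--     :return: Start and end indices of the longest continuous segment.
--     """
--     max_length = 0
--     current_length = 0
--     n_args = len(data_array)
--     start_idx = int(y_start*start_padding)
--     longest_segment = (0, 0)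
--
--     for i in range(start_idx, int(n_args*0.95)):
--         if abs(data_array[i] - data_array[i - window_range]) <= tolerance:
--             current_length += 1
--             if current_length > max_length:
--                 max_length = current_length
--                 longest_segment = (i, n_args-1)
--         else:
--             current_length = 0
--             start_idx = i
--
--
--     return longest_segment
-- ===== SOURCE B (Python) =====
-- def find_longest_continuous_segment2(data_array, y_start, start_padding=1, window_range=4, tolerance=100):
--     n = len(data_array)
--     start = int(y_start * start_padding)
--     stop = int(n * 0.95)
--     # indices scanned by the tolerance test where the chain is broken
--     breaks = [i for i in range(start, stop)
--               if abs(data_array[i] - data_array[i - window_range]) > tolerance]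
--     # maximal within-tolerance runs are the gaps between consecutive break points
--     bounds = [start - 1] + breaks + [stop]
--     best_len, best_end = 0, 0
--     for b1, b2 in zip(bounds, bounds[1:]):
--         run = b2 - b1 - 1
--         if run > best_len:
--             best_len, best_end = run, b2 - 1
--     return (best_end, n - 1) if best_len > 0 else (0, 0)
-- ===== Notes on version B (the rewrite author's own statement) =====
-- stated objective: alternative
-- what changed: Replaces A's running-counter/best-so-far scan with a break-list decomposition: B collects the indices where the tolerance test fails in one comprehension and then picks the largest gap between consecutive break points (keeping the first maximal gap), instead of maintaining current/max lengths while scanning.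
import Mathlib
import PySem

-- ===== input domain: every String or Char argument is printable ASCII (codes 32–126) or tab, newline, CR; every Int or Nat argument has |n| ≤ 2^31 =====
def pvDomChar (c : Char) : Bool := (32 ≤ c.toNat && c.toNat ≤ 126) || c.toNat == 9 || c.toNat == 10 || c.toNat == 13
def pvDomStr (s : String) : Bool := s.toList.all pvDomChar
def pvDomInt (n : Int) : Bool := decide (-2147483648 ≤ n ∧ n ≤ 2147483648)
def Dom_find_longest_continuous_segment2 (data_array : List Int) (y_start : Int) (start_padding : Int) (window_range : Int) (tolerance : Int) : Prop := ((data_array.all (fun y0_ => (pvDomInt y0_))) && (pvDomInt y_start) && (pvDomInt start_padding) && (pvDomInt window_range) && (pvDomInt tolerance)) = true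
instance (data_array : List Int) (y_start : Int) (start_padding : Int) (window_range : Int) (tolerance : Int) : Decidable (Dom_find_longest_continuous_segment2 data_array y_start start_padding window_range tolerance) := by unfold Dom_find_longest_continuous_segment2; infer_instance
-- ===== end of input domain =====

-- B replaces A's running counter/best-so-far scan by a break-list decomposition: it collects the
-- indices where the tolerance test fails and takes the largest gap between consecutive breaks
-- (objective: alternative; same asymptotic cost).

-- ===== PORT A =====
-- exact simulation of CPython's `int(n * 0.95)` for a list length n:
-- 0.95 as an IEEE-754 double is 8556839292003942 / 2^53; `n` is rounded to a double
-- (round-to-nearest, ties-to-even), multiplied, the product rounded again, then floored.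
def pvRoundAt (p : Nat) (sh : Nat) : Nat :=
  let keep := p / 2 ^ sh
  let rem := p % 2 ^ sh
  let half := 2 ^ (sh - 1)
  if half < rem ∨ (rem = half ∧ keep % 2 = 1) then keep + 1 else keep

def pvRound53 (n : Nat) : Nat :=
  if n < 2 ^ 53 then n
  else
    let sh := Nat.log2 n + 1 - 53
    pvRoundAt n sh * 2 ^ sh

def pvFloat95 (n : Nat) : Nat :=
  let p := pvRound53 n * 8556839292003942
  if p < 2 ^ 53 then p / 2 ^ 53
  else
    let sh := Nat.log2 p + 1 - 53
    pvRoundAt p sh * 2 ^ sh / 2 ^ 53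

-- the loop condition `abs(data_array[i] - data_array[i - window_range]) <= tolerance`
-- (pyGet? is Python indexing with negative-index wraparound; Pre_ guarantees `some`,
-- so the `.getD 0` default is never the value used)
def pvOk (data_array : List Int) (window_range : Int) (tolerance : Int) (i : Int) : Bool :=
  decide (|(PySem.List.pyGet? data_array i).getD 0 -
           (PySem.List.pyGet? data_array (i - window_range)).getD 0| ≤ tolerance)

def find_longest_continuous_segment2 (data_array : List Int) (y_start : Int) (start_padding : Int) (window_range : Int) (tolerance : Int) : Int × Int :=
  let n_args : Int := data_array.length
  let start_idx : Int := y_start * start_padding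
  -- state = (max_length, current_length, longest_segment); `start_idx = i` in A's else-branch
  -- is dead (the range is already fixed), so it leaves no trace in the state
  let st :=
    (PySem.List.pyRange start_idx ((pvFloat95 data_array.length : Nat) : Int) 1).foldl
      (fun (st : Int × Int × (Int × Int)) i =>
        if pvOk data_array window_range tolerance i then
          if st.1 < st.2.1 + 1 then (st.2.1 + 1, st.2.1 + 1, (i, n_args - 1))
          else (st.1, st.2.1 + 1, st.2.2)
        else (st.1, 0, st.2.2))
      (0, 0, (0, 0))
  st.2.2

-- ===== PORT B =====
def find_longest_continuous_segment2_alt (data_array : List Int) (y_start : Int) (start_padding : Int) (window_range : Int) (tolerance : Int) : Int × Int :=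
  let n : Int := data_array.length
  let start : Int := y_start * start_padding
  let stop : Int := ((pvFloat95 data_array.length : Nat) : Int)
  let breaks :=
    (PySem.List.pyRange start stop 1).filter
      (fun i => decide (tolerance < |(PySem.List.pyGet? data_array i).getD 0 -
                                     (PySem.List.pyGet? data_array (i - window_range)).getD 0|))
  let bounds := (start - 1) :: breaks ++ [stop]
  let r :=
    (bounds.zip bounds.tail).foldl
      (fun (st : Int × Int) (p : Int × Int) =>
        if st.1 < p.2 - p.1 - 1 then (p.2 - p.1 - 1, p.2 - 1) else st)
      (0, 0)
  if 0 < r.1 then (r.2, n - 1) else (0, 0)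

-- ===== PRECONDITION & SPEC =====
-- Pre_ excludes exactly the inputs where A's loop raises IndexError: some scanned index i,
-- or i - window_range, falls outside Python's valid index range [-len, len).
def Pre_find_longest_continuous_segment2 (data_array : List Int) (y_start : Int) (start_padding : Int) (window_range : Int) (tolerance : Int) : Prop :=
  y_start * start_padding < ((pvFloat95 data_array.length : Nat) : Int) →
    (-(data_array.length : Int) ≤ y_start * start_padding ∧
     ((pvFloat95 data_array.length : Nat) : Int) - 1 < (data_array.length : Int) ∧
     -(data_array.length : Int) ≤ y_start * start_padding - window_range ∧
     ((pvFloat95 data_array.length : Nat) : Int) - 1 - window_range < (data_array.length : Int))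

instance (data_array : List Int) (y_start : Int) (start_padding : Int) (window_range : Int) (tolerance : Int) : Decidable (Pre_find_longest_continuous_segment2 data_array y_start start_padding window_range tolerance) := by
  unfold Pre_find_longest_continuous_segment2; infer_instance

def pvWitness_find_longest_continuous_segment2 : List Int × Int × Int × Int × Int :=
  ([5, 5, 5, 5, 5, 5, 5, 5, 5, 5], 0, 1, 1, 2)

def Spec_find_longest_continuous_segment2 (data_array : List Int) (y_start : Int) (start_padding : Int) (window_range : Int) (tolerance : Int) (out : Int × Int) : Prop := out = find_longest_continuous_segment2_alt data_array y_start start_padding window_range tolerance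
instance (data_array : List Int) (y_start : Int) (start_padding : Int) (window_range : Int) (tolerance : Int) (out : Int × Int) : Decidable (Spec_find_longest_continuous_segment2 data_array y_start start_padding window_range tolerance out) := by unfold Spec_find_longest_continuous_segment2; infer_instance

-- ===== CLAIM (what is proved, stated in full; the proofs are below) =====
def Claim_equal_find_longest_continuous_segment2 : Prop := ∀ (data_array : List Int) (y_start : Int) (start_padding : Int) (window_range : Int) (tolerance : Int), Dom_find_longest_continuous_segment2 data_array y_start start_padding window_range tolerance → Pre_find_longest_continuous_segment2 data_array y_start start_padding window_range tolerance → Spec_find_longest_continuous_segment2 data_array y_start start_padding window_range tolerance (find_longest_continuous_segment2 data_array y_start start_padding window_range tolerance)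

-- ===== LEMMAS AND PROOFS =====

-- the consecutive index list [j, j+1, …, j+len-1]
def pvIdx (j : Int) : Nat → List Int
  | 0 => []
  | len + 1 => j :: pvIdx (j + 1) len

-- A's loop as fuel recursion over (max, cur, bestEnd); returns (final max, final bestEnd)
def pvG (ok : Int → Bool) : Nat → Int → Int → Int → Int → Int × Int
  | 0, _, m, _, be => (m, be)
  | len + 1, j, m, c, be =>
    if ok j then
      if m < c + 1 then pvG ok len (j + 1) (c + 1) (c + 1) j
      else pvG ok len (j + 1) m (c + 1) be
    else pvG ok len (j + 1) m 0 be

-- A's loop as fuel recursion carrying the full segment pair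
def pvGA (ok : Int → Bool) (n : Int) : Nat → Int → Int → Int → (Int × Int) → Int × Int
  | 0, _, _, _, seg => seg
  | len + 1, j, m, c, seg =>
    if ok j then
      if m < c + 1 then pvGA ok n len (j + 1) (c + 1) (c + 1) (j, n - 1)
      else pvGA ok n len (j + 1) m (c + 1) seg
    else pvGA ok n len (j + 1) m 0 seg

-- B's fold over the zipped pairs, as structural recursion over the bounds list
def pvPairFold : List Int → (Int × Int) → Int × Int
  | b1 :: b2 :: rest, st =>
      pvPairFold (b2 :: rest) (if st.1 < b2 - b1 - 1 then (b2 - b1 - 1, b2 - 1) else st)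
  | _, st => st

def pvBad (ok : Int → Bool) (j : Int) (len : Nat) : List Int :=
  (pvIdx j len).filter (fun i => !(ok i))

theorem pyRange_eq_pvIdx_aux (len : Nat) : ∀ (j e : Int), (e - j).toNat = len →
    PySem.List.pyRange j e 1 = pvIdx j len := by
  induction len with
  | zero =>
      intro j e h
      rw [PySem.List.pyRange_one, h]
      simp [pvIdx]
  | succ len ih =>
      intro j e h
      have hj : j < e := by omega
      rw [PySem.List.pyRange_one_cons hj, pvIdx, ih (j + 1) e (by omega)]

theorem pyRange_eq_pvIdx (j e : Int) :
    PySem.List.pyRange j e 1 = pvIdx j (e - j).toNat :=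
  pyRange_eq_pvIdx_aux (e - j).toNat j e rfl

theorem zip_foldl_eq_pvPairFold (bounds : List Int) : ∀ (st : Int × Int),
    (bounds.zip bounds.tail).foldl
      (fun (st : Int × Int) (p : Int × Int) =>
        if st.1 < p.2 - p.1 - 1 then (p.2 - p.1 - 1, p.2 - 1) else st) st
    = pvPairFold bounds st := by
  induction bounds with
  | nil => intro st; simp [pvPairFold]
  | cons b1 rest ih =>
      intro st
      cases rest with
      | nil => simp [pvPairFold]
      | cons b2 r2 =>
          simp only [List.tail_cons, List.zip_cons_cons, List.foldl_cons, pvPairFold]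
          exact ih _

theorem pvG_mono (ok : Int → Bool) (len : Nat) : ∀ (j m c be : Int),
    m ≤ (pvG ok len j m c be).1 := by
  induction len with
  | zero => intro j m c be; simp [pvG]
  | succ len ih =>
      intro j m c be
      simp only [pvG]
      split_ifs with h1 h2
      · exact le_trans (by omega) (ih (j + 1) (c + 1) (c + 1) j)
      · exact ih _ _ _ _
      · exact ih _ _ _ _

theorem pvG_stay (ok : Int → Bool) (len : Nat) : ∀ (j m c be : Int),
    (pvG ok len j m c be).1 = m → (pvG ok len j m c be).2 = be := by
  induction len with
  | zero => intro j m c be _; simp [pvG]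
  | succ len ih =>
      intro j m c be h
      simp only [pvG] at h ⊢
      split_ifs at h ⊢ with h1 h2
      · have := pvG_mono ok len (j + 1) (c + 1) (c + 1) j
        omega
      · exact ih _ _ _ _ h
      · exact ih _ _ _ _ h

theorem pvGA_char (ok : Int → Bool) (n : Int) (len : Nat) : ∀ (j m c be : Int) (seg : Int × Int),
    pvGA ok n len j m c seg =
      (if m < (pvG ok len j m c be).1 then ((pvG ok len j m c be).2, n - 1) else seg) := by
  induction len with
  | zero => intro j m c be seg; simp [pvGA, pvG]
  | succ len ih =>
      intro j m c be seg
      simp only [pvGA, pvG]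
      by_cases h1 : ok j
      · simp only [h1, if_true]
        by_cases h2 : m < c + 1
        · simp only [h2, if_true]
          have hupd : m < (pvG ok len (j + 1) (c + 1) (c + 1) j).1 :=
            lt_of_lt_of_le h2 (pvG_mono ok len (j + 1) (c + 1) (c + 1) j)
          rw [if_pos hupd, ih (j + 1) (c + 1) (c + 1) j (j, n - 1)]
          split_ifs with h3
          · rfl
          · have hmono := pvG_mono ok len (j + 1) (c + 1) (c + 1) j
            have h4 : (pvG ok len (j + 1) (c + 1) (c + 1) j).1 = c + 1 := by omega
            rw [pvG_stay ok len (j + 1) (c + 1) (c + 1) j h4]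
        · simp only [h2, if_false]
          exact ih (j + 1) m (c + 1) be seg
      · simp only [h1, if_false, Bool.false_eq_true]
        exact ih (j + 1) m 0 be seg

theorem foldA_eq_pvGA (ok : Int → Bool) (n : Int) (len : Nat) :
    ∀ (j m c : Int) (seg : Int × Int),
    ((pvIdx j len).foldl
      (fun (st : Int × Int × (Int × Int)) i =>
        if ok i then
          if st.1 < st.2.1 + 1 then (st.2.1 + 1, st.2.1 + 1, (i, n - 1))
          else (st.1, st.2.1 + 1, st.2.2)
        else (st.1, 0, st.2.2)) (m, c, seg)).2.2
    = pvGA ok n len j m c seg := by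
  induction len with
  | zero => intro j m c seg; simp [pvIdx, pvGA]
  | succ len ih =>
      intro j m c seg
      simp only [pvIdx, List.foldl_cons, pvGA]
      split_ifs with h1 h2 <;> exact ih _ _ _ _

theorem pvG_congr (ok : Int → Bool) (len : Nat) (j : Int) {m m' c c' be be' : Int}
    (h1 : m = m') (h2 : c = c') (h3 : be = be') :
    pvG ok len j m c be = pvG ok len j m' c' be' := by
  rw [h1, h2, h3]

theorem pvHB (ok : Int → Bool) (len : Nat) : ∀ (j lb m be : Int), lb + 1 ≤ j →
    pvPairFold (lb :: pvBad ok j len ++ [j + (len : Int)]) (m, be)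
    = pvG ok len j (if m < j - 1 - lb then j - 1 - lb else m) (j - 1 - lb)
        (if m < j - 1 - lb then j - 1 else be) := by
  induction len with
  | zero =>
      intro j lb m be _
      have hb : lb :: pvBad ok j 0 ++ [j + ((0 : Nat) : Int)] = [lb, j] := by
        simp [pvBad, pvIdx]
      rw [hb]
      have hf : pvPairFold [lb, j] (m, be)
          = (if m < j - lb - 1 then (j - lb - 1, j - 1) else (m, be)) := rfl
      rw [hf]
      have h : j - lb - 1 = j - 1 - lb := by ring
      rw [h]
      simp only [pvG]
      split_ifs <;> rfl
  | succ len ih =>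
      intro j lb m be hlb
      have hcast : j + ((len + 1 : Nat) : Int) = (j + 1) + (len : Int) := by push_cast; ring
      rw [hcast]
      by_cases hok : ok j
      · have hbad : pvBad ok j (len + 1) = pvBad ok (j + 1) len := by
          simp [pvBad, pvIdx, hok]
        rw [hbad, ih (j + 1) lb m be (by omega)]
        simp only [pvG, hok, if_true]
        split_ifs <;> first | rfl | (apply pvG_congr <;> omega)
      · have hbad : pvBad ok j (len + 1) = j :: pvBad ok (j + 1) len := by
          simp [pvBad, pvIdx, hok]
        rw [hbad]
        simp only [List.cons_append, pvPairFold]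
        have hst : (if (m, be).1 < j - lb - 1 then ((j - lb - 1 : Int), (j - 1 : Int)) else (m, be))
            = ((if m < j - lb - 1 then j - lb - 1 else m), (if m < j - lb - 1 then j - 1 else be)) := by
          split_ifs <;> rfl
        rw [hst]
        have hih := ih (j + 1) j (if m < j - lb - 1 then j - lb - 1 else m)
              (if m < j - lb - 1 then j - 1 else be) (by omega)
        refine hih.trans ?_
        simp only [pvG, hok, if_false, Bool.false_eq_true]
        split_ifs <;> first | rfl | (apply pvG_congr <;> omega)

-- assemble A's value for a nonempty range
theorem pvA_eq (ok : Int → Bool) (n s e : Int) :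
    ((pvIdx s (e - s).toNat).foldl
      (fun (st : Int × Int × (Int × Int)) i =>
        if ok i then
          if st.1 < st.2.1 + 1 then (st.2.1 + 1, st.2.1 + 1, (i, n - 1))
          else (st.1, st.2.1 + 1, st.2.2)
        else (st.1, 0, st.2.2)) (0, 0, (0, 0))).2.2
    = (if 0 < (pvG ok (e - s).toNat s 0 0 0).1
        then ((pvG ok (e - s).toNat s 0 0 0).2, n - 1) else (0, 0)) := by
  rw [foldA_eq_pvGA, pvGA_char ok n _ s 0 0 0 (0, 0)]

-- assemble B's pair-fold value for a nonempty range
theorem pvB_eq (ok : Int → Bool) (s e : Int) (hse : s < e) :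
    pvPairFold ((s - 1) :: pvBad ok s (e - s).toNat ++ [e]) (0, 0)
    = pvG ok (e - s).toNat s 0 0 0 := by
  set len := (e - s).toNat with hlen
  have he : e = s + (len : Int) := by omega
  rw [he, pvHB ok len s (s - 1) 0 0 (by omega)]
  have e1 : s - 1 - (s - 1) = 0 := by omega
  norm_num [e1]

-- ===== VERDICT (by name: the statement is the Claim_ definition above) =====
theorem find_longest_continuous_segment2_spec : Claim_equal_find_longest_continuous_segment2 := by
  intro data_array y_start start_padding window_range tolerance _ _
  unfold Spec_find_longest_continuous_segment2
  unfold find_longest_continuous_segment2 find_longest_continuous_segment2_alt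
  set ok := pvOk data_array window_range tolerance with hok
  set n : Int := (data_array.length : Int)
  set s : Int := y_start * start_padding
  set e : Int := ((pvFloat95 data_array.length : Nat) : Int)
  simp only []
  have hfilter :
      (PySem.List.pyRange s e 1).filter
        (fun i => decide (tolerance < |(PySem.List.pyGet? data_array i).getD 0 -
                                       (PySem.List.pyGet? data_array (i - window_range)).getD 0|))
      = (PySem.List.pyRange s e 1).filter (fun i => !(ok i)) := by
    apply List.filter_congr
    intro i _
    rw [hok]
    unfold pvOk
    rw [← decide_not]
    exact decide_eq_decide.mpr (Int.not_le).symm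
  rw [hfilter, pyRange_eq_pvIdx]
  rw [show (pvIdx s (e - s).toNat).filter (fun i => !(ok i)) = pvBad ok s (e - s).toNat from rfl]
  rw [zip_foldl_eq_pvPairFold]
  by_cases hse : s < e
  · rw [pvA_eq ok n s e, pvB_eq ok s e hse]
  · have h0 : (e - s).toNat = 0 := by omega
    rw [h0]
    have hb : ((s - 1) :: pvBad ok s 0 ++ [e]) = [s - 1, e] := by simp [pvBad, pvIdx]
    rw [hb]
    have hv : pvPairFold [s - 1, e] ((0 : Int), (0 : Int))
        = (if (0 : Int) < e - (s - 1) - 1 then (e - (s - 1) - 1, e - 1) else (0, 0)) := rfl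
    rw [hv, if_neg (by omega : ¬ ((0 : Int) < e - (s - 1) - 1))]
    simp [pvIdx]
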